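-- pv_equiv track=rewrite | github.com/garrett-low/leetcode | python/fem_algos/dynamic_programming/find_max_dp.py | f_max
-- ===== SOURCE A (Python) =====
-- def f_max(arr, i):
--     if i >= len(arr):
--         return -1
--
--     max_subarr = f_max(arr, i + 1)
--
--     if arr[i] > max_subarr:
--         return arr[i]
--     else:
--         return max_subarr
-- ===== SOURCE B (Python) =====
-- def f_max(arr, i):
--     result = -1
--     for j in range(i, len(arr)):
--         if arr[j] > result:
--             result = arr[j]
--     return result
-- ===== Notes on version B (the rewrite author's own statement) =====
-- stated objective: simpler
-- what changed: Replaces the linear recursion with an iterative single-pass loop over range(i, len(arr)) keeping a running maximum initialised to -1.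
import Mathlib
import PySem

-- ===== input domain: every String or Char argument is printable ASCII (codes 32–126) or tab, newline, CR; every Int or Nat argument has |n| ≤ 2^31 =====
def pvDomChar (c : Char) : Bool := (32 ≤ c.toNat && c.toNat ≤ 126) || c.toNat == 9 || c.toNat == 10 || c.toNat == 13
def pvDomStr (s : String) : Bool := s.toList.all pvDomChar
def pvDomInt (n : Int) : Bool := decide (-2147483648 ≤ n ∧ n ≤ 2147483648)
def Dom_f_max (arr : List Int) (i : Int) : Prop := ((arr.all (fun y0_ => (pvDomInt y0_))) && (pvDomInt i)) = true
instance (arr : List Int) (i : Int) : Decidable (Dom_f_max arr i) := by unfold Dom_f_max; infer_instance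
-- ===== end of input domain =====

-- B replaces A's linear recursion with an iterative single-pass running-maximum loop (simpler: O(1) space, no recursion).


-- ===== PORT A =====
-- literal port of A's recursion; the 'none' branch of pyGet? is Python's IndexError, excluded by Pre_f_max
def f_max (arr : List Int) (i : Int) : Int :=
  if _h : i ≥ (arr.length : Int) then -1
  else
    let max_subarr := f_max arr (i + 1)
    match PySem.List.pyGet? arr i with
    | some v => if v > max_subarr then v else max_subarr
    | none => -1   -- IndexError in Python; unreachable under Pre_f_max
termination_by ((arr.length : Int) - i).toNat
decreasing_by omega

-- ===== PORT B =====
-- literal port of B: result = -1; for j in range(i, len(arr)): if arr[j] > result: result = arr[j]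
-- (the 'none' branch is Python's IndexError, excluded by Pre_f_max)
def f_max_alt (arr : List Int) (i : Int) : Int :=
  (PySem.List.pyRange i (arr.length : Int) 1).foldl
    (fun result j =>
      match PySem.List.pyGet? arr j with
      | some v => if v > result then v else result
      | none => result)
    (-1)

-- ===== PRECONDITION & SPEC =====
-- Pre_ excludes i < -len(arr), where both Pythons raise IndexError.
def Pre_f_max (arr : List Int) (i : Int) : Prop := -(arr.length : Int) ≤ i
instance (arr : List Int) (i : Int) : Decidable (Pre_f_max arr i) := by unfold Pre_f_max; infer_instance
def pvWitness_f_max : List Int × Int := ([3, -1, 2], 0)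
def Spec_f_max (arr : List Int) (i : Int) (out : Int) : Prop := out = f_max_alt arr i
instance (arr : List Int) (i : Int) (out : Int) : Decidable (Spec_f_max arr i out) := by unfold Spec_f_max; infer_instance

-- ===== CLAIM (what is proved, stated in full; the proofs are below) =====
def Claim_equal_f_max : Prop := ∀ (arr : List Int) (i : Int), Dom_f_max arr i → Pre_f_max arr i → Spec_f_max arr i (f_max arr i)

-- ===== LEMMAS AND PROOFS =====

-- the loop body of B, abstracted over the list access
def pvStep (arr : List Int) (result j : Int) : Int :=
  match PySem.List.pyGet? arr j with
  | some v => if v > result then v else result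
  | none => result

lemma pvStep_ge (arr : List Int) (r j : Int) : r ≤ pvStep arr r j := by
  unfold pvStep; cases PySem.List.pyGet? arr j with
  | none => simp
  | some v => dsimp; split <;> omega

-- pulling an accumulator a ≥ -1 out of the fold: foldl pvStep a l = max a (foldl pvStep (-1) l)
lemma pvFoldl_max (arr : List Int) (l : List Int) (a : Int) (ha : -1 ≤ a) :
    l.foldl (pvStep arr) a = max a (l.foldl (pvStep arr) (-1)) := by
  induction l generalizing a with
  | nil =>
    simp [List.foldl]; omega
  | cons x l ih =>
    simp only [List.foldl]
    rw [ih (pvStep arr a x) (le_trans ha (pvStep_ge arr a x)),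
        ih (pvStep arr (-1) x) (pvStep_ge arr (-1) x)]
    unfold pvStep
    cases PySem.List.pyGet? arr x with
    | none => simp; omega
    | some v =>
      dsimp
      rcases max_cases v a with ⟨h1, h2⟩ | ⟨h1, h2⟩ <;>
      rcases max_cases v (-1 : Int) with ⟨h3, h4⟩ | ⟨h3, h4⟩ <;>
      · simp only [max_def]
        split_ifs <;> omega

lemma f_max_eq_alt (arr : List Int) (i : Int) (hpre : -(arr.length : Int) ≤ i) :
    f_max arr i = f_max_alt arr i := by
  by_cases h : i ≥ (arr.length : Int)
  · rw [f_max]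
    simp only [h, dite_true]
    unfold f_max_alt
    rw [PySem.List.pyRange_one_eq_nil h]
    rfl
  · have hlt : i < (arr.length : Int) := lt_of_not_ge h
    have hget : ∃ v, PySem.List.pyGet? arr i = some v := by
      rcases Option.eq_none_or_eq_some (PySem.List.pyGet? arr i) with hn | hs
      · exfalso
        rw [PySem.List.pyGet?_eq_none_iff] at hn
        exact hn ⟨hpre, hlt⟩
      · exact hs
    obtain ⟨v, hv⟩ := hget
    have ih : f_max arr (i + 1) = f_max_alt arr (i + 1) :=
      f_max_eq_alt arr (i + 1) (by omega)
    have hstep : pvStep arr (-1) i = max v (-1) := by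
      unfold pvStep; rw [hv]; dsimp; rcases max_cases v (-1 : Int) with ⟨h1, h2⟩ | ⟨h1, h2⟩ <;>
        · rw [h1]; split_ifs <;> omega
    have halt_ge : -1 ≤ f_max_alt arr (i + 1) := by
      unfold f_max_alt
      have : ∀ (l : List Int) (a : Int), a ≤ l.foldl (pvStep arr) a := by
        intro l; induction l with
        | nil => intro a; simp
        | cons x l ihl => intro a; exact le_trans (pvStep_ge arr a x) (ihl _)
      exact this _ _
    have hB : f_max_alt arr i = max (max v (-1)) (f_max_alt arr (i + 1)) := by
      unfold f_max_alt
      rw [PySem.List.pyRange_one_cons hlt]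
      rw [show (fun (result j : Int) => match PySem.List.pyGet? arr j with
            | some v => if v > result then v else result
            | none => result) = pvStep arr from rfl]
      rw [List.foldl_cons, pvFoldl_max arr _ _ (pvStep_ge arr (-1) i), hstep]
    rw [f_max]
    simp only [h, dite_false, hv]
    rw [hB, ih]
    rcases max_cases v (f_max_alt arr (i + 1)) with ⟨h1, h2⟩ | ⟨h1, h2⟩ <;>
      · simp only [max_def]; split_ifs <;> omega
termination_by ((arr.length : Int) - i).toNat
decreasing_by omega

-- ===== VERDICT (by name: the statement is the Claim_ definition above) =====
theorem f_max_spec : Claim_equal_f_max := by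
  intro arr i _ hpre
  unfold Spec_f_max
  exact f_max_eq_alt arr i hpre
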